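-- pv_equiv track=rewrite | github.com/osman-tkdmr/leetcode | 0835-largestOverlap.py | largestOverlap
-- ===== SOURCE A (Python) =====
-- import collections
--
-- def largestOverlap(img1, img2) :
-- 	overlapDict = collections.defaultdict(int)
-- 	A = []
-- 	B = []
-- 	ans = 0
-- 	for i in range(len(img1)):
-- 		for j in range(len(img1[0])):
-- 			if img1[i][j] == 1:
-- 				A.append((i, j))
-- 			if img2[i][j] == 1:
-- 				B.append((i,j))
-- 	for a in A:
-- 		for b in B:
-- 			translation = (a[0]-b[0], a[1]-b[1])
-- 			overlapDict[translation] += 1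
-- 			ans = max(ans, overlapDict[translation])
-- 	return ans
-- ===== SOURCE B (Python) =====
-- def largestOverlap(img1, img2):
--     h = len(img1)
--     w = len(img1[0]) if h else 0
--     ones1 = [(i, j) for i in range(h) for j in range(w) if img1[i][j] == 1]
--     best = 0
--     for dx in range(-h + 1, h):
--         for dy in range(-w + 1, w):
--             c = 0
--             for (i, j) in ones1:
--                 if 0 <= i - dx < h and 0 <= j - dy < w and img2[i - dx][j - dy] == 1:
--                     c += 1
--             if c > best:
--                 best = c
--     return best
-- ===== Notes on version B (the rewrite author's own statement) =====
-- stated objective: alternative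
-- what changed: B enumerates every candidate shift (dx,dy) and counts the overlapping ones of img1 against img2 directly, instead of A's hash-counter of translation vectors over all pairs of ones with a running max.
import Mathlib
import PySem

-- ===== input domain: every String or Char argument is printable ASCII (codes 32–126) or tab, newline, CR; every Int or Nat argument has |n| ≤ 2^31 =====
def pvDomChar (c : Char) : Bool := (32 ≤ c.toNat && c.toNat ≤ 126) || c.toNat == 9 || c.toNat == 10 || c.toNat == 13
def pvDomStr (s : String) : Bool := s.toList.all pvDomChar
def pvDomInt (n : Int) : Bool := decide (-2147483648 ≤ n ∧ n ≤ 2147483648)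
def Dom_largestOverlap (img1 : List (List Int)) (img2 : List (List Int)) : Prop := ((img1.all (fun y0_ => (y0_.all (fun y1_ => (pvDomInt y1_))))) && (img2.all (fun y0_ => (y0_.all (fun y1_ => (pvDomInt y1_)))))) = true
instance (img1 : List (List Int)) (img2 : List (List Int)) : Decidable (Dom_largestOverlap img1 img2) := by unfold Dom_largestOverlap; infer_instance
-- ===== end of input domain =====

-- B replaces A's pair-by-pair translation counter (hash map + running max) by direct
-- enumeration of every candidate shift, counting the overlap of the two bitmaps per shift
-- (objective: alternative algorithm, similar cost).

-- shared transliteration of the Python indexing idiom 'img[i][j]' (the .getD defaults are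
-- reached only outside Pre_, where Python A raises)
def pvGetV (img : List (List Int)) (i j : Int) : Int :=
  (PySem.List.pyGet? ((PySem.List.pyGet? img i).getD []) j).getD 0

-- ===== PORT A =====
def largestOverlap (img1 : List (List Int)) (img2 : List (List Int)) : Int :=
  -- phase 1: collect coordinates of ones of img1 (list A) and img2 (list B)
  let w : Int := ((PySem.List.pyGet? img1 0).getD []).length
  let AB : List (Int × Int) × List (Int × Int) :=
    (PySem.List.pyRange 0 (img1.length : Int) 1).foldl (fun AB i =>
      (PySem.List.pyRange 0 w 1).foldl (fun AB j =>
        (if pvGetV img1 i j = 1 then AB.1 ++ [(i, j)] else AB.1,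
         if pvGetV img2 i j = 1 then AB.2 ++ [(i, j)] else AB.2)) AB)
      ([], [])
  -- phase 2: defaultdict counter over translations with a running max
  let res : Int × PySem.Dict (Int × Int) Int :=
    AB.1.foldl (fun st a =>
      AB.2.foldl (fun (st : Int × PySem.Dict (Int × Int) Int) b =>
        (max st.1 (st.2.getD (a.1 - b.1, a.2 - b.2) 0 + 1),
         st.2.insert (a.1 - b.1, a.2 - b.2) (st.2.getD (a.1 - b.1, a.2 - b.2) 0 + 1))) st)
      (0, PySem.Dict.empty)
  res.1

-- the coordinates of ones of `img` in the index rectangle [0,h) × [0,w) — transliteration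
-- of Source B's list comprehension building ones1 (helper of port B)
def onesOf (img : List (List Int)) (h w : Int) : List (Int × Int) :=
  (PySem.List.pyRange 0 h 1).flatMap (fun i =>
    ((PySem.List.pyRange 0 w 1).filter (fun j => pvGetV img i j = 1)).map (fun j => (i, j)))

-- ===== PORT B =====
def largestOverlap_alt (img1 : List (List Int)) (img2 : List (List Int)) : Int :=
  let h : Int := img1.length
  let w : Int := if h = 0 then 0 else (img1.headD []).length
  let ones1 : List (Int × Int) := onesOf img1 h w
  (PySem.List.pyRange (-h + 1) h 1).foldl (fun best dx =>
    (PySem.List.pyRange (-w + 1) w 1).foldl (fun best dy =>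
      let c := ones1.foldl (fun c a =>
        if 0 ≤ a.1 - dx ∧ a.1 - dx < h ∧ 0 ≤ a.2 - dy ∧ a.2 - dy < w ∧
            pvGetV img2 (a.1 - dx) (a.2 - dy) = 1 then c + 1 else c) (0 : Int)
      if c > best then c else best) best) 0

-- ===== PRECONDITION & SPEC =====
-- Pre_ excludes exactly the inputs on which Python A raises an IndexError: when the first
-- row of img1 is nonempty (w > 0), every row of img1 must have length ≥ w, and img2 must
-- have at least as many rows as img1, each of its first len(img1) rows of length ≥ w.
def Pre_largestOverlap (img1 : List (List Int)) (img2 : List (List Int)) : Prop :=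
  ((PySem.List.pyGet? img1 0).getD []).length = 0 ∨
  (img1.length ≤ img2.length ∧
   (∀ r ∈ img1, ((PySem.List.pyGet? img1 0).getD []).length ≤ r.length) ∧
   (∀ r ∈ img2.take img1.length, ((PySem.List.pyGet? img1 0).getD []).length ≤ r.length))
instance (img1 : List (List Int)) (img2 : List (List Int)) : Decidable (Pre_largestOverlap img1 img2) := by
  unfold Pre_largestOverlap; infer_instance

def pvWitness_largestOverlap : List (List Int) × List (List Int) :=
  ([[1, 1, 0], [0, 1, 0], [0, 1, 0]], [[0, 0, 0], [0, 1, 1], [0, 0, 1]])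

def Spec_largestOverlap (img1 : List (List Int)) (img2 : List (List Int)) (out : Int) : Prop := out = largestOverlap_alt img1 img2
instance (img1 : List (List Int)) (img2 : List (List Int)) (out : Int) : Decidable (Spec_largestOverlap img1 img2 out) := by unfold Spec_largestOverlap; infer_instance

-- ===== CLAIM (what is proved, stated in full; the proofs are below) =====
def Claim_equal_largestOverlap : Prop := ∀ (img1 : List (List Int)) (img2 : List (List Int)), Dom_largestOverlap img1 img2 → Pre_largestOverlap img1 img2 → Spec_largestOverlap img1 img2 (largestOverlap img1 img2)

-- ===== LEMMAS AND PROOFS =====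

-- the multiset of translations a - b, a ∈ o1, b ∈ o2 — the list A's phase 2 iterates over
def tsOf (o1 o2 : List (Int × Int)) : List (Int × Int) :=
  o1.flatMap (fun a => o2.map (fun b => (a.1 - b.1, a.2 - b.2)))

-- the maximal multiplicity in a list, consumed from the right
def goMC : List (Int × Int) → Int
  | [] => 0
  | x :: r => max (goMC r) ((r.count x : Int) + 1)

-- ---------- A-side: phase 1 builds the two ones-lists ----------

theorem phase1_inner (img1 img2 : List (List Int)) (i : Int) (jl : List Int)
    (acc : List (Int × Int) × List (Int × Int)) :
    jl.foldl (fun AB j =>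
        (if pvGetV img1 i j = 1 then AB.1 ++ [(i, j)] else AB.1,
         if pvGetV img2 i j = 1 then AB.2 ++ [(i, j)] else AB.2)) acc
    = (acc.1 ++ (jl.filter (fun j => pvGetV img1 i j = 1)).map (fun j => (i, j)),
       acc.2 ++ (jl.filter (fun j => pvGetV img2 i j = 1)).map (fun j => (i, j))) := by
  induction jl generalizing acc with
  | nil => simp
  | cons j jl ih =>
    rw [List.foldl_cons, ih]
    simp only [List.filter_cons]
    split_ifs <;> simp_all

theorem phase1_outer (img1 img2 : List (List Int)) (w : Int) (il : List Int)
    (acc : List (Int × Int) × List (Int × Int)) :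
    il.foldl (fun AB i =>
      (PySem.List.pyRange 0 w 1).foldl (fun AB j =>
        (if pvGetV img1 i j = 1 then AB.1 ++ [(i, j)] else AB.1,
         if pvGetV img2 i j = 1 then AB.2 ++ [(i, j)] else AB.2)) AB) acc
    = (acc.1 ++ il.flatMap (fun i => (((PySem.List.pyRange 0 w 1).filter (fun j => pvGetV img1 i j = 1)).map (fun j => (i, j)))),
       acc.2 ++ il.flatMap (fun i => (((PySem.List.pyRange 0 w 1).filter (fun j => pvGetV img2 i j = 1)).map (fun j => (i, j))))) := by
  induction il generalizing acc with
  | nil => simp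
  | cons i il ih =>
    rw [List.foldl_cons, phase1_inner, ih]
    simp

-- ---------- A-side: phase 2 is a fold of a counter step over tsOf ----------

def stepA (st : Int × PySem.Dict (Int × Int) Int) (t : Int × Int) : Int × PySem.Dict (Int × Int) Int :=
  (max st.1 (st.2.getD t 0 + 1), st.2.insert t (st.2.getD t 0 + 1))

theorem phase2_flatten (o2 : List (Int × Int)) (o1 : List (Int × Int))
    (init : Int × PySem.Dict (Int × Int) Int) :
    o1.foldl (fun st a =>
      o2.foldl (fun (st : Int × PySem.Dict (Int × Int) Int) b =>
        (max st.1 (st.2.getD (a.1 - b.1, a.2 - b.2) 0 + 1),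
         st.2.insert (a.1 - b.1, a.2 - b.2) (st.2.getD (a.1 - b.1, a.2 - b.2) 0 + 1))) st) init
    = (tsOf o1 o2).foldl stepA init := by
  induction o1 generalizing init with
  | nil => simp [tsOf]
  | cons a o1 ih =>
    simp only [List.foldl_cons, tsOf, List.flatMap_cons, List.foldl_append]
    rw [ih, List.foldl_map]
    rfl

theorem dictInv (ts : List (Int × Int)) : ∀ (a0 : Int) (d0 : PySem.Dict (Int × Int) Int) (t : Int × Int),
    ((ts.foldl stepA (a0, d0)).2).getD t 0 = d0.getD t 0 + (ts.count t : Int) := by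
  induction ts with
  | nil => intro a0 d0 t; simp
  | cons y ts ih =>
    intro a0 d0 t
    simp only [List.foldl_cons, stepA]
    rw [ih, PySem.Dict.getD_insert, List.count_cons]
    by_cases h : t = y
    · subst h; simp; ring
    · have : (y == t) = false := by simp [Ne.symm h]
      simp [h, this]

theorem ansA (ts : List (Int × Int)) :
    (ts.foldl stepA ((0 : Int), PySem.Dict.empty)).1 = goMC ts.reverse := by
  induction ts using List.reverseRecOn with
  | nil => simp [goMC]
  | append_singleton ts x ih =>
    rw [List.foldl_append]
    simp only [List.foldl_cons, List.foldl_nil, stepA]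
    rw [ih, dictInv, List.reverse_append]
    simp [goMC, List.count_reverse]

theorem A_result (img1 img2 : List (List Int)) :
    largestOverlap img1 img2
    = goMC (tsOf (onesOf img1 (img1.length : Int) (((PySem.List.pyGet? img1 0).getD []).length : Int))
                 (onesOf img2 (img1.length : Int) (((PySem.List.pyGet? img1 0).getD []).length : Int))).reverse := by
  simp only [largestOverlap]
  rw [phase1_outer, phase2_flatten]
  simp only [List.nil_append, onesOf]
  rw [ansA]


-- ---------- B-side: membership and nodup of the ones-lists ----------

theorem mem_onesOf (img : List (List Int)) (h w : Int) (x : Int × Int) :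
    x ∈ onesOf img h w ↔ (0 ≤ x.1 ∧ x.1 < h ∧ 0 ≤ x.2 ∧ x.2 < w ∧ pvGetV img x.1 x.2 = 1) := by
  obtain ⟨x1, x2⟩ := x
  simp only [onesOf, List.mem_flatMap, List.mem_map, List.mem_filter,
    PySem.List.mem_pyRange_one, decide_eq_true_eq, Prod.mk.injEq]
  constructor
  · rintro ⟨i, ⟨hi0, hih⟩, j, ⟨⟨hj0, hjw⟩, hv⟩, rfl, rfl⟩
    exact ⟨hi0, hih, hj0, hjw, hv⟩
  · rintro ⟨h1, h2, h3, h4, h5⟩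
    exact ⟨x1, ⟨h1, h2⟩, x2, ⟨⟨h3, h4⟩, h5⟩, rfl, rfl⟩

theorem nodup_onesOf (img : List (List Int)) (h w : Int) : (onesOf img h w).Nodup := by
  rw [onesOf, List.nodup_flatMap]
  constructor
  · intro i _
    apply List.Nodup.map
    · intro a b hab
      exact congrArg Prod.snd hab
    · exact (PySem.List.nodup_pyRange_one 0 w).filter _
  · apply (PySem.List.pairwise_lt_pyRange_one 0 h).imp
    intro i i' hlt x hx hx'
    simp only [List.mem_map, List.mem_filter] at hx hx'
    obtain ⟨j, -, rfl⟩ := hx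
    obtain ⟨j', -, hj'⟩ := hx'
    exact absurd (congrArg Prod.fst hj').symm (by simp; omega)

-- ---------- B-side: the per-shift overlap count is a multiplicity in tsOf ----------

theorem count_map_sub (o : List (Int × Int)) (hno : o.Nodup) (a s : Int × Int) :
    (o.map (fun b => (a.1 - b.1, a.2 - b.2))).count s
    = if (a.1 - s.1, a.2 - s.2) ∈ o then 1 else 0 := by
  have h1 : (o.map (fun b => (a.1 - b.1, a.2 - b.2))).count s
      = o.countP (fun b => b == (a.1 - s.1, a.2 - s.2)) := by
    rw [List.count, List.countP_map]
    apply List.countP_congr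
    intro b _
    simp only [Function.comp_apply, beq_iff_eq, Prod.ext_iff]
    constructor <;> (intro hh; constructor <;> omega)
  rw [h1]
  rw [show (fun b => b == (a.1 - s.1, a.2 - s.2)) = (· == (a.1 - s.1, a.2 - s.2)) from rfl,
    ← List.count]
  by_cases hm : (a.1 - s.1, a.2 - s.2) ∈ o
  · simp [hm, List.count_eq_one_of_mem hno hm]
  · simp [hm, List.count_eq_zero.mpr hm]

theorem count_tsOf (o1 o2 : List (Int × Int)) (hno : o2.Nodup) (s : Int × Int) :
    (tsOf o1 o2).count s = o1.countP (fun a => decide ((a.1 - s.1, a.2 - s.2) ∈ o2)) := by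
  induction o1 with
  | nil => simp [tsOf]
  | cons a o1 ih =>
    simp only [tsOf, List.flatMap_cons, List.count_append, List.countP_cons] at *
    rw [ih, count_map_sub o2 hno a s]
    by_cases hm : (a.1 - s.1, a.2 - s.2) ∈ o2 <;> simp [hm] <;> omega

-- ---------- max-fold lemmas ----------

theorem inner_le (S : List Int) (g : Int → Int) (c : Int) :
    ∀ a : Int, (∀ dy ∈ S, g dy ≤ c) → a ≤ c →
      S.foldl (fun b dy => max b (g dy)) a ≤ c := by
  induction S with
  | nil => intro a _ hac; simpa using hac
  | cons dy S ih =>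
    intro a hg hac
    simp only [List.foldl_cons]
    exact ih _ (fun z hz => hg z (List.mem_cons_of_mem _ hz))
      (max_le hac (hg dy List.mem_cons_self))

theorem nested_ge_init (S1 S2 : List Int) (f : Int → Int → Int) :
    ∀ a : Int, a ≤ S1.foldl (fun b dx => S2.foldl (fun b dy => max b (f dx dy)) b) a := by
  induction S1 with
  | nil => intro a; simp
  | cons dx S1 ih =>
    intro a
    simp only [List.foldl_cons]
    exact le_trans (PySem.List.le_foldl_max_int S2 (f dx) a).1 (ih _)

theorem nested_ge_mem (S1 S2 : List Int) (f : Int → Int → Int) (dx dy : Int)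
    (h1 : dx ∈ S1) (h2 : dy ∈ S2) :
    ∀ a : Int, f dx dy ≤ S1.foldl (fun b dx => S2.foldl (fun b dy => max b (f dx dy)) b) a := by
  induction S1 with
  | nil => cases h1
  | cons dx' S1 ih =>
    intro a
    simp only [List.foldl_cons]
    rcases List.mem_cons.mp h1 with rfl | hmem
    · exact le_trans ((PySem.List.le_foldl_max_int S2 (f dx) a).2 dy h2)
        (nested_ge_init S1 S2 f _)
    · exact ih hmem _

theorem nested_le (S1 S2 : List Int) (f : Int → Int → Int) (c : Int)
    (hf : ∀ dx ∈ S1, ∀ dy ∈ S2, f dx dy ≤ c) :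
    ∀ a : Int, a ≤ c →
      S1.foldl (fun b dx => S2.foldl (fun b dy => max b (f dx dy)) b) a ≤ c := by
  induction S1 with
  | nil => intro a hac; simpa using hac
  | cons dx S1 ih =>
    intro a hac
    simp only [List.foldl_cons]
    exact ih (fun z hz => hf z (List.mem_cons_of_mem _ hz)) _
      (inner_le S2 (f dx) c a (hf dx List.mem_cons_self) hac)

-- ---------- goMC lemmas ----------

theorem goMC_nonneg (r : List (Int × Int)) : 0 ≤ goMC r := by
  induction r with
  | nil => simp [goMC]
  | cons x r ih => simp only [goMC]; positivity

theorem count_le_goMC (r : List (Int × Int)) (t : Int × Int) (ht : t ∈ r) :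
    (r.count t : Int) ≤ goMC r := by
  induction r with
  | nil => cases ht
  | cons x r ih =>
    simp only [goMC, List.count_cons]
    rcases List.mem_cons.mp ht with rfl | hmem
    · simp only [beq_self_eq_true, if_true]; push_cast; omega
    · have h1 := ih hmem
      by_cases hx : x = t
      · subst hx; simp only [beq_self_eq_true, if_true]; push_cast at h1 ⊢; omega
      · have hb : (x == t) = false := by simp [hx]
        simp only [hb]; push_cast at h1 ⊢; omega

theorem goMC_le (r : List (Int × Int)) (c : Int) (hc : 0 ≤ c)
    (h : ∀ t ∈ r, (r.count t : Int) ≤ c) : goMC r ≤ c := by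
  induction r with
  | nil => simpa [goMC]
  | cons x r ih =>
    simp only [goMC]
    apply max_le
    · apply ih
      intro t ht
      refine le_trans ?_ (h t (List.mem_cons_of_mem _ ht))
      rw [List.count_cons]
      push_cast; omega
    · have hx := h x List.mem_cons_self
      rw [List.count_cons] at hx
      simp only [beq_self_eq_true, if_true] at hx
      push_cast at hx ⊢; omega

-- ---------- B normal form and final assembly ----------

theorem w_alt_eq (img1 : List (List Int)) :
    (if (img1.length : Int) = 0 then (0 : Int) else ((img1.headD []).length : Int))
    = (((PySem.List.pyGet? img1 0).getD []).length : Int) := by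
  cases img1 with
  | nil => simp [PySem.List.pyGet?]
  | cons r rest =>
    simp
    intro hcon
    omega

theorem B_norm (img2 : List (List Int)) (o1 o2 : List (Int × Int)) (h w : Int)
    (S1 S2 : List Int) (hno2 : o2.Nodup)
    (hmem : ∀ x : Int × Int, x ∈ o2 ↔ (0 ≤ x.1 ∧ x.1 < h ∧ 0 ≤ x.2 ∧ x.2 < w ∧ pvGetV img2 x.1 x.2 = 1)) :
    S1.foldl (fun best dx =>
      S2.foldl (fun best dy =>
        if (o1.foldl (fun c a =>
              if 0 ≤ a.1 - dx ∧ a.1 - dx < h ∧ 0 ≤ a.2 - dy ∧ a.2 - dy < w ∧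
                  pvGetV img2 (a.1 - dx) (a.2 - dy) = 1 then c + 1 else c) (0 : Int)) > best
        then (o1.foldl (fun c a =>
              if 0 ≤ a.1 - dx ∧ a.1 - dx < h ∧ 0 ≤ a.2 - dy ∧ a.2 - dy < w ∧
                  pvGetV img2 (a.1 - dx) (a.2 - dy) = 1 then c + 1 else c) (0 : Int))
        else best) best) 0
    = S1.foldl (fun best dx =>
        S2.foldl (fun best dy => max best (((tsOf o1 o2).count (dx, dy) : Int))) best) 0 := by
  apply PySem.List.foldl_congr_mem
  intro acc dx _
  apply PySem.List.foldl_congr_mem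
  intro acc' dy _
  rw [PySem.List.foldl_ite_add_one, zero_add]
  have hcp : o1.countP (fun a => decide (0 ≤ a.1 - dx ∧ a.1 - dx < h ∧ 0 ≤ a.2 - dy ∧ a.2 - dy < w ∧
        pvGetV img2 (a.1 - dx) (a.2 - dy) = 1))
      = o1.countP (fun a => decide ((a.1 - dx, a.2 - dy) ∈ o2)) := by
    apply List.countP_congr
    intro a _
    simp only [decide_eq_true_eq]
    exact (hmem (a.1 - dx, a.2 - dy)).symm
  rw [hcp, ← count_tsOf o1 o2 hno2 (dx, dy)]
  split_ifs with hgt <;> omega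

theorem main_eq (img1 img2 : List (List Int)) :
    largestOverlap img1 img2 = largestOverlap_alt img1 img2 := by
  have hno2 := nodup_onesOf img2 (img1.length : Int) (((PySem.List.pyGet? img1 0).getD []).length : Int)
  rw [A_result]
  simp only [largestOverlap_alt]
  rw [w_alt_eq]
  rw [B_norm img2
      (onesOf img1 (img1.length : Int) (((PySem.List.pyGet? img1 0).getD []).length : Int))
      (onesOf img2 (img1.length : Int) (((PySem.List.pyGet? img1 0).getD []).length : Int))
      (img1.length : Int) (((PySem.List.pyGet? img1 0).getD []).length : Int)
      _ _ hno2 (fun x => mem_onesOf img2 _ _ x)]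
  -- abbreviations
  set h : Int := (img1.length : Int) with hh
  set W : Int := (((PySem.List.pyGet? img1 0).getD []).length : Int) with hW
  set o1 := onesOf img1 h W with ho1
  set o2 := onesOf img2 h W with ho2
  set ts := tsOf o1 o2 with hts
  have hts_mem : ∀ t ∈ ts, (-h + 1 ≤ t.1 ∧ t.1 < h) ∧ (-W + 1 ≤ t.2 ∧ t.2 < W) := by
    intro t ht
    rw [hts] at ht
    simp only [tsOf, List.mem_flatMap, List.mem_map] at ht
    obtain ⟨a, ha, b, hb, rfl⟩ := ht
    rw [ho1, mem_onesOf] at ha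
    rw [ho2, mem_onesOf] at hb
    constructor <;> constructor <;> simp <;> omega
  apply le_antisymm
  · apply goMC_le
    · exact nested_ge_init _ _ _ 0
    · intro t ht
      have ht' : t ∈ ts := List.mem_reverse.mp ht
      have hb := hts_mem t ht'
      have hge := nested_ge_mem (PySem.List.pyRange (-h + 1) h 1) (PySem.List.pyRange (-W + 1) W 1)
          (fun dx dy => ((ts.count (dx, dy) : Int))) t.1 t.2
          (PySem.List.mem_pyRange_one.mpr hb.1) (PySem.List.mem_pyRange_one.mpr hb.2) 0
      simpa [List.count_reverse] using hge
  · apply nested_le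
    · intro dx _ dy _
      by_cases hm : (dx, dy) ∈ ts
      · have hle := count_le_goMC ts.reverse (dx, dy) (List.mem_reverse.mpr hm)
        rwa [List.count_reverse] at hle
      · rw [show ts.count (dx, dy) = 0 from List.count_eq_zero.mpr hm]
        simpa using goMC_nonneg ts.reverse
    · exact goMC_nonneg ts.reverse

-- ===== VERDICT (by name: the statement is the Claim_ definition above) =====
theorem largestOverlap_spec : Claim_equal_largestOverlap := by
  intro img1 img2 _ _
  unfold Spec_largestOverlap
  exact main_eq img1 img2
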